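-- pv_equiv track=rewrite | github.com/franbenegas/Tesis | Promedios.py | find_longest_interval
-- ===== SOURCE A (Python) =====
-- def find_longest_interval(times, max_gap=1):
--     longest_interval = []
--     current_interval = [times[0]]
--
--     for i in range(1, len(times)):
--         if times[i] - times[i-1] <= max_gap:
--             current_interval.append(times[i])
--         else:
--             if len(current_interval) > len(longest_interval):
--                 longest_interval = current_interval
--             current_interval = [times[i]]
--
--     if len(current_interval) > len(longest_interval):
--         longest_interval = current_interval
--
--     return longest_interval
-- ===== SOURCE B (Python) =====
-- def find_longest_interval(times, max_gap=1):
--     n = len(times)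
--     boundaries = [0]
--     for i in range(1, n):
--         if times[i] - times[i - 1] > max_gap:
--             boundaries.append(i)
--     boundaries.append(n)
--     best_s, best_e = 0, 0
--     for s, e in zip(boundaries, boundaries[1:]):
--         if e - s > best_e - best_s:
--             best_s, best_e = s, e
--     return times[best_s:best_e]
-- ===== Notes on version B (the rewrite author's own statement) =====
-- stated objective: alternative
-- what changed: Replaces the single-pass run-accumulation (building and copying candidate sublists while scanning) by a two-pass boundary decomposition: first collect the split indices where the gap exceeds max_gap, then pick the consecutive boundary pair spanning the most elements and return that slice.
import Mathlib
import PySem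

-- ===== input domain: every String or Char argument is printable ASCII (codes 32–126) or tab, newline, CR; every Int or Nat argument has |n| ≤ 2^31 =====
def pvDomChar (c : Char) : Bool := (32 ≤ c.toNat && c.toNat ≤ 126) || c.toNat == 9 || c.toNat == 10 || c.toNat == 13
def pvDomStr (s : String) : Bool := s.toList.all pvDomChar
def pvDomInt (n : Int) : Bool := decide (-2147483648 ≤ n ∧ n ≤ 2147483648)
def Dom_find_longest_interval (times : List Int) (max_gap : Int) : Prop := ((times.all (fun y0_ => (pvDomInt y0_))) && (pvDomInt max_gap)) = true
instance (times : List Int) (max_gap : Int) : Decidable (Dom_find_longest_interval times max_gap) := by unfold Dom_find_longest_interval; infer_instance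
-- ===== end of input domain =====

-- B replaces A's single-pass run accumulation by a two-pass boundary decomposition (split indices, then best consecutive pair, then one slice); same result, proved equal on nonempty input.


-- ===== PORT A =====
def find_longest_interval (times : List Int) (max_gap : Int) : List Int :=
  let longest_interval : List Int := []
  let current_interval : List Int := [PySem.List.pyGetD times 0 0]
  let st :=
    (PySem.List.pyRange 1 (PySem.List.len times) 1).foldl
      (fun (st : List Int × List Int) i =>
        if PySem.List.pyGetD times i 0 - PySem.List.pyGetD times (i - 1) 0 ≤ max_gap then
          (st.1, st.2 ++ [PySem.List.pyGetD times i 0])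
        else if st.2.length > st.1.length then
          (st.2, [PySem.List.pyGetD times i 0])
        else
          (st.1, [PySem.List.pyGetD times i 0]))
      (longest_interval, current_interval)
  if st.2.length > st.1.length then st.2 else st.1

-- ===== PORT B =====
def find_longest_interval_alt (times : List Int) (max_gap : Int) : List Int :=
  let n := PySem.List.len times
  let boundaries :=
    (PySem.List.pyRange 1 n 1).foldl
      (fun (bs : List Int) i =>
        if PySem.List.pyGetD times i 0 - PySem.List.pyGetD times (i - 1) 0 > max_gap then
          bs ++ [i]
        else bs)
      [0]
  let boundaries := boundaries ++ [n]
  let best :=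
    (boundaries.zip boundaries.tail).foldl
      (fun (st : Int × Int) p => if p.2 - p.1 > st.2 - st.1 then p else st) (0, 0)
  PySem.List.slice times (some best.1) (some best.2)

-- ===== PRECONDITION & SPEC =====
-- Pre_ excludes exactly the empty list, on which Python A raises IndexError (times[0]).
def Pre_find_longest_interval (times : List Int) (max_gap : Int) : Prop := times ≠ []
instance (times : List Int) (max_gap : Int) : Decidable (Pre_find_longest_interval times max_gap) := by unfold Pre_find_longest_interval; infer_instance
def pvWitness_find_longest_interval : List Int × Int := ([0, 1, 5, 6, 7], 1)

def Spec_find_longest_interval (times : List Int) (max_gap : Int) (out : List Int) : Prop := out = find_longest_interval_alt times max_gap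
instance (times : List Int) (max_gap : Int) (out : List Int) : Decidable (Spec_find_longest_interval times max_gap out) := by unfold Spec_find_longest_interval; infer_instance

-- ===== CLAIM (what is proved, stated in full; the proofs are below) =====
def Claim_equal_find_longest_interval : Prop := ∀ (times : List Int) (max_gap : Int), Dom_find_longest_interval times max_gap → Pre_find_longest_interval times max_gap → Spec_find_longest_interval times max_gap (find_longest_interval times max_gap)

-- ===== LEMMAS AND PROOFS =====

-- The maximal-run decomposition of x :: rest under gap bound g: (first run, later runs).
def runsF (g x : Int) : List Int → List Int × List (List Int)
  | [] => ([x], [])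
  | y :: rest =>
    if y - x ≤ g then (x :: (runsF g y rest).1, (runsF g y rest).2)
    else ([x], (runsF g y rest).1 :: (runsF g y rest).2)

theorem runsF_fst_cons (g x : Int) (l : List Int) :
    (runsF g x l).1 = x :: (runsF g x l).1.tail := by
  cases l with
  | nil => rfl
  | cons y rest => simp only [runsF]; split <;> rfl

theorem loopA_eq_best (g : Int) : ∀ (rest : List Int) (x : Int) (L C : List Int),
    (if (((x :: rest).zip rest).foldl
        (fun (st : List Int × List Int) p =>
          if p.2 - p.1 ≤ g then (st.1, st.2 ++ [p.2])
          else if st.2.length > st.1.length then (st.2, [p.2]) else (st.1, [p.2])) (L, C)).2.length >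
        (((x :: rest).zip rest).foldl
        (fun (st : List Int × List Int) p =>
          if p.2 - p.1 ≤ g then (st.1, st.2 ++ [p.2])
          else if st.2.length > st.1.length then (st.2, [p.2]) else (st.1, [p.2])) (L, C)).1.length
     then (((x :: rest).zip rest).foldl
        (fun (st : List Int × List Int) p =>
          if p.2 - p.1 ≤ g then (st.1, st.2 ++ [p.2])
          else if st.2.length > st.1.length then (st.2, [p.2]) else (st.1, [p.2])) (L, C)).2
     else (((x :: rest).zip rest).foldl
        (fun (st : List Int × List Int) p =>
          if p.2 - p.1 ≤ g then (st.1, st.2 ++ [p.2])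
          else if st.2.length > st.1.length then (st.2, [p.2]) else (st.1, [p.2])) (L, C)).1)
    = ((C ++ (runsF g x rest).1.tail) :: (runsF g x rest).2).foldl
        (fun acc r => if r.length > acc.length then r else acc) L := by
  intro rest
  induction rest with
  | nil => intro x L C; simp [runsF]
  | cons y rest ih =>
    intro x L C
    simp only [List.zip_cons_cons, List.foldl_cons, runsF]
    by_cases h : y - x ≤ g
    · simp only [h, if_pos]
      have := ih y L (C ++ [y])
      rw [this]
      rw [runsF_fst_cons g y rest]
      simp
    · simp only [h, if_neg, not_false_iff]
      by_cases h2 : C.length > L.length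
      · simp only [h2, if_pos]
        have := ih y C [y]
        rw [this, runsF_fst_cons g y rest]
        simp [h2]
      · simp only [h2, if_neg, not_false_iff]
        have := ih y L [y]
        rw [this, runsF_fst_cons g y rest]
        simp [h2]

-- Bridge: A's index loop over range(1, len(t)) reading t[i-1], t[i] is the fold over adjacent pairs.
theorem bridge_pairs {σ : Type} (f : σ → Int → Int → σ) :
    ∀ (post pre : List Int) (x : Int) (init : σ),
    (PySem.List.pyRange ((pre.length : Int) + 1) (((pre ++ x :: post).length : Int)) 1).foldl
        (fun st i => f st (PySem.List.pyGetD (pre ++ x :: post) (i - 1) 0)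
                          (PySem.List.pyGetD (pre ++ x :: post) i 0)) init
      = ((x :: post).zip post).foldl (fun st p => f st p.1 p.2) init := by
  intro post
  induction post with
  | nil =>
    intro pre x init
    rw [PySem.List.pyRange_one_eq_nil (by simp only [List.length_append, List.length_cons, List.length_nil]; omega)]
    simp
  | cons y post ih =>
    intro pre x init
    rw [PySem.List.pyRange_one_cons (by simp only [List.length_append, List.length_cons]; omega)]
    simp only [List.foldl_cons, List.zip_cons_cons]
    have hx : PySem.List.pyGetD (pre ++ x :: y :: post) ((pre.length : Int) + 1 - 1) 0 = x := by
      simp [PySem.List.pyGetD_natCast, List.getD_eq_getElem?_getD]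
    have hy : PySem.List.pyGetD (pre ++ x :: y :: post) ((pre.length : Int) + 1) 0 = y := by
      have : ((pre.length : Int) + 1) = (((pre ++ [x]).length : Nat) : Int) := by simp
      rw [this, PySem.List.pyGetD_natCast]
      simp [List.getD_eq_getElem?_getD]
    rw [hx, hy]
    have := ih (pre ++ [x]) y (f init x y)
    simp only [List.append_assoc, List.cons_append, List.nil_append] at this
    have hlen : ((pre ++ [x]).length : Int) + 1 = (pre.length : Int) + 1 + 1 := by
      push_cast [List.length_append, List.length_cons, List.length_nil]; ring
    rw [hlen] at this
    exact this

-- the split ("gap") indices of t from position a on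
def gapB (t : List Int) (g a : Int) : List Int :=
  (PySem.List.pyRange a ((t.length : Nat) : Int) 1).filter
    (fun i => decide (PySem.List.pyGetD t i 0 - PySem.List.pyGetD t (i - 1) 0 > g))

theorem mem_gapB {t : List Int} {g a x : Int} (h : x ∈ gapB t g a) :
    a ≤ x ∧ x < (t.length : Int) := by
  have := List.mem_of_mem_filter h
  exact (PySem.List.mem_pyRange_one).1 this

theorem slice_cons_of_head {pre post : List Int} {x : Int} (h : Int)
    (h1 : (pre.length : Int) + 1 ≤ h) (h2 : h ≤ ((pre ++ x :: post).length : Int)) :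
    PySem.List.slice (pre ++ x :: post) (some (pre.length : Int)) (some h)
      = x :: PySem.List.slice (pre ++ x :: post) (some ((pre.length : Int) + 1)) (some h) := by
  rw [PySem.List.slice_toNat _ (by omega) (by omega),
      PySem.List.slice_toNat _ (by omega) (by omega)]
  have he : ((pre.length : Int)).toNat = pre.length := by omega
  have he1 : ((pre.length : Int) + 1).toNat = pre.length + 1 := by omega
  rw [he, he1]
  have hd1 : (pre ++ x :: post).drop pre.length = x :: post := List.drop_left
  have hd2 : (pre ++ x :: post).drop (pre.length + 1) = post := by
    rw [show pre.length + 1 = (pre ++ [x]).length by simp]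
    rw [show pre ++ x :: post = (pre ++ [x]) ++ post by simp]
    exact List.drop_left
  rw [hd1, hd2]
  have : h.toNat - pre.length = (h.toNat - (pre.length + 1)) + 1 := by omega
  rw [this, List.take_succ_cons]

theorem slicesB (g : Int) : ∀ (post pre : List Int) (x : Int),
    (((pre.length : Int) :: (gapB (pre ++ x :: post) g ((pre.length : Int) + 1) ++ [((pre ++ x :: post).length : Int)])).zip
      ((gapB (pre ++ x :: post) g ((pre.length : Int) + 1)) ++ [((pre ++ x :: post).length : Int)])).map
        (fun p => PySem.List.slice (pre ++ x :: post) (some p.1) (some p.2))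
    = (runsF g x post).1 :: (runsF g x post).2 := by
  intro post
  induction post with
  | nil =>
    intro pre x
    have hnil : gapB (pre ++ [x]) g ((pre.length : Int) + 1) = [] := by
      unfold gapB
      rw [PySem.List.pyRange_one_eq_nil (by simp only [List.length_append, List.length_cons, List.length_nil]; omega)]
      rfl
    rw [hnil]
    simp only [List.nil_append, List.zip_cons_cons, List.zip_nil_right, List.map_cons,
      List.map_nil]
    have hr1 : (runsF g x []).1 = [x] := rfl
    have hr2 : (runsF g x []).2 = ([] : List (List Int)) := rfl
    rw [hr1, hr2]
    congr 1
    rw [PySem.List.slice_toNat _ (by omega) (by omega)]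
    have hl1 : (pre ++ [x]).length = pre.length + 1 := by simp
    have he : ((pre.length : Int)).toNat = pre.length := by omega
    have he1 : (((pre ++ [x]).length : Int)).toNat = pre.length + 1 := by
      rw [Int.toNat_natCast, hl1]
    rw [he, he1, List.drop_left]
    have ht1 : pre.length + 1 - pre.length = 1 := by omega
    rw [ht1]
    rfl
  | cons y post ih =>
    intro pre x
    have hxv : PySem.List.pyGetD (pre ++ x :: y :: post) ((pre.length : Int) + 1 - 1) 0 = x := by
      simp [PySem.List.pyGetD_natCast, List.getD_eq_getElem?_getD]
    have hyv : PySem.List.pyGetD (pre ++ x :: y :: post) ((pre.length : Int) + 1) 0 = y := by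
      have : ((pre.length : Int) + 1) = (((pre ++ [x]).length : Nat) : Int) := by simp
      rw [this, PySem.List.pyGetD_natCast]
      simp [List.getD_eq_getElem?_getD]
    have hgap : gapB (pre ++ x :: y :: post) g ((pre.length : Int) + 1)
        = (if y - x > g then [(pre.length : Int) + 1] else [])
          ++ gapB (pre ++ x :: y :: post) g ((pre.length : Int) + 1 + 1) := by
      unfold gapB
      rw [PySem.List.pyRange_one_cons (by simp only [List.length_append, List.length_cons]; omega),
        List.filter_cons, hxv, hyv]
      by_cases hc : y - x > g
      · rw [if_pos (by simpa using hc), if_pos hc]; rfl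
      · rw [if_neg (by simpa using hc), if_neg hc]; rfl
    have iht := ih (pre ++ [x]) y
    have hre : (((pre ++ [x]).length : Nat) : Int) = (pre.length : Int) + 1 := by
      push_cast [List.length_append, List.length_cons, List.length_nil]; ring
    simp only [List.append_assoc, List.singleton_append, hre] at iht
    rcases hl : gapB (pre ++ x :: y :: post) g ((pre.length : Int) + 1 + 1)
        ++ [((pre ++ x :: y :: post).length : Int)] with _ | ⟨b, l⟩
    · exact absurd hl (by simp)
    rw [hl] at iht
    simp only [List.zip_cons_cons, List.map_cons] at iht
    have hbmem : b ∈ gapB (pre ++ x :: y :: post) g ((pre.length : Int) + 1 + 1)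
        ++ [((pre ++ x :: y :: post).length : Int)] := by
      rw [hl]; exact List.mem_cons_self
    have htlen : ((pre ++ x :: y :: post).length : Int)
        = (pre.length : Int) + 2 + (post.length : Int) := by
      push_cast [List.length_append, List.length_cons]; ring
    have hb2 : (pre.length : Int) + 2 ≤ b ∧ b ≤ ((pre ++ x :: y :: post).length : Int) := by
      rcases List.mem_append.1 hbmem with hm | hm
      · have := mem_gapB hm
        constructor <;> omega
      · have hb' : b = ((pre ++ x :: y :: post).length : Int) := by simpa using hm
        constructor <;> omega
    rw [hgap]
    by_cases h : y - x ≤ g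
    · have hr1 : (runsF g x (y :: post)).1 = x :: (runsF g y post).1 := by
        simp [runsF, h]
      have hr2 : (runsF g x (y :: post)).2 = (runsF g y post).2 := by
        simp [runsF, h]
      rw [hr1, hr2, if_neg (show ¬ y - x > g by omega), List.nil_append, hl]
      simp only [List.zip_cons_cons, List.map_cons]
      obtain ⟨hhead, htail⟩ := List.cons_eq_cons.mp iht
      rw [slice_cons_of_head b (by omega) (by omega), hhead, htail]
    · have hr1 : (runsF g x (y :: post)).1 = [x] := by
        simp [runsF, h]
      have hr2 : (runsF g x (y :: post)).2 = (runsF g y post).1 :: (runsF g y post).2 := by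
        simp [runsF, h]
      rw [hr1, hr2, if_pos (show y - x > g by omega)]
      simp only [List.cons_append, List.nil_append, hl]
      simp only [List.zip_cons_cons, List.map_cons]
      rw [iht]
      congr 1
      rw [PySem.List.slice_toNat _ (by omega) (by omega)]
      have he : ((pre.length : Int)).toNat = pre.length := by omega
      have he1 : ((pre.length : Int) + 1).toNat = pre.length + 1 := by omega
      rw [he, he1, List.drop_left]
      have ht1 : pre.length + 1 - pre.length = 1 := by omega
      rw [ht1]
      rfl

-- a weight-preserving map commutes with the argmax fold
theorem foldl_pick_commute (h : Int × Int → List Int) :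
    ∀ (ps : List (Int × Int)) (st : Int × Int),
    (∀ p ∈ ps, ((h p).length : Int) = p.2 - p.1) → (((h st).length : Int) = st.2 - st.1) →
    h (ps.foldl (fun st p => if p.2 - p.1 > st.2 - st.1 then p else st) st)
      = (ps.map h).foldl (fun acc r => if r.length > acc.length then r else acc) (h st) := by
  intro ps
  induction ps with
  | nil => intro st _ _; simp
  | cons p ps ih =>
    intro st hall hst
    simp only [List.foldl_cons, List.map_cons]
    have hp : ((h p).length : Int) = p.2 - p.1 := hall p List.mem_cons_self
    have hiff : ((h p).length > (h st).length) ↔ (p.2 - p.1 > st.2 - st.1) := by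
      constructor <;> intro hh
      · have : ((h st).length : Int) < ((h p).length : Int) := by exact_mod_cast hh
        omega
      · have : ((h st).length : Int) < ((h p).length : Int) := by omega
        exact_mod_cast this
    by_cases hc : p.2 - p.1 > st.2 - st.1
    · rw [if_pos hc, if_pos (hiff.2 hc)]
      exact ih p (fun q hq => hall q (List.mem_cons_of_mem _ hq)) hp
    · rw [if_neg hc, if_neg (fun hh => hc (hiff.1 hh))]
      exact ih st (fun q hq => hall q (List.mem_cons_of_mem _ hq)) hst

theorem zip_tail_adj : ∀ (l : List Int), l.Pairwise (· < ·) →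
    ∀ p ∈ l.zip l.tail, p.1 < p.2 := by
  intro l
  induction l with
  | nil => intro _ p hp; simp at hp
  | cons a l ih =>
    intro hpw p hp
    cases l with
    | nil => simp at hp
    | cons b l' =>
      simp only [List.tail_cons, List.zip_cons_cons, List.mem_cons] at hp
      rcases hp with rfl | hp
      · exact (List.pairwise_cons.1 hpw).1 b List.mem_cons_self
      · exact ih (List.pairwise_cons.1 hpw).2 p hp

theorem pairwise_bnd (t : List Int) (g : Int) (hne : t ≠ []) :
    ((0 : Int) :: (gapB t g 1 ++ [(t.length : Int)])).Pairwise (· < ·) := by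
  have hn : 0 < t.length := List.length_pos_iff.mpr hne
  have hpw : (gapB t g 1).Pairwise (· < ·) :=
    List.Pairwise.filter _ (PySem.List.pairwise_lt_pyRange_one _ _)
  rw [List.pairwise_cons]
  constructor
  · intro x hx
    rcases List.mem_append.1 hx with hm | hm
    · have := mem_gapB hm; omega
    · have : x = (t.length : Int) := by simpa using hm
      omega
  · rw [List.pairwise_append]
    refine ⟨hpw, by simp, ?_⟩
    intro x hx y hy
    have hyv : y = (t.length : Int) := by simpa using hy
    have := mem_gapB hx
    omega

theorem bnd_bounds {t : List Int} {g v : Int}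
    (h : v ∈ (0 : Int) :: (gapB t g 1 ++ [(t.length : Int)])) :
    0 ≤ v ∧ v ≤ (t.length : Int) := by
  rcases List.mem_cons.1 h with rfl | h'
  · constructor <;> omega
  rcases List.mem_append.1 h' with hm | hm
  · have := mem_gapB hm; omega
  · have : v = (t.length : Int) := by simpa using hm
    omega

theorem slice_len (xs : List Int) (a b : Int) (h0 : 0 ≤ a) (hab : a ≤ b)
    (hb : b ≤ (xs.length : Int)) :
    (((PySem.List.slice xs (some a) (some b)).length : Nat) : Int) = b - a := by
  rw [PySem.List.slice_toNat _ h0 (by omega)]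
  simp only [List.length_take, List.length_drop]
  omega

-- ===== VERDICT (by name: the statement is the Claim_ definition above) =====
theorem find_longest_interval_spec : Claim_equal_find_longest_interval := by
  unfold Claim_equal_find_longest_interval
  intro times g _ hpre
  unfold Spec_find_longest_interval
  obtain ⟨x, rest, rfl⟩ : ∃ x rest, times = x :: rest := by
    cases times with
    | nil => exact absurd rfl hpre
    | cons a l => exact ⟨a, l, rfl⟩
  have hA : find_longest_interval (x :: rest) g
      = ((runsF g x rest).1 :: (runsF g x rest).2).foldl
          (fun acc r => if r.length > acc.length then r else acc) [] := by
    have hbr := bridge_pairs (σ := List Int × List Int)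
      (fun st prev cur => if cur - prev ≤ g then (st.1, st.2 ++ [cur])
        else if st.2.length > st.1.length then (st.2, [cur]) else (st.1, [cur]))
      rest [] x ([], [x])
    simp only [List.nil_append, List.length_nil, Nat.cast_zero, zero_add] at hbr
    simp only [find_longest_interval, PySem.List.len_eq, PySem.List.pyGetD_zero_cons]
    rw [hbr, loopA_eq_best g rest x [] [x], List.singleton_append, ← runsF_fst_cons g x rest]
  have hB : find_longest_interval_alt (x :: rest) g
      = ((runsF g x rest).1 :: (runsF g x rest).2).foldl
          (fun acc r => if r.length > acc.length then r else acc) [] := by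
    have hfb := PySem.List.foldl_append_ite_eq_filter
      (fun i => PySem.List.pyGetD (x :: rest) i 0 - PySem.List.pyGetD (x :: rest) (i - 1) 0 > g)
      (PySem.List.pyRange 1 (((x :: rest).length : Nat) : Int) 1) [0]
    simp only [find_longest_interval_alt, PySem.List.len_eq]
    rw [hfb]
    rw [show List.filter (fun i => decide (PySem.List.pyGetD (x :: rest) i 0 - PySem.List.pyGetD (x :: rest) (i - 1) 0 > g)) (PySem.List.pyRange 1 (((x :: rest).length : Nat) : Int) 1) = gapB (x :: rest) g 1 from rfl]
    rw [show (([(0:Int)] ++ gapB (x :: rest) g 1) ++ [(((x :: rest).length : Nat) : Int)]) = (0 : Int) :: (gapB (x :: rest) g 1 ++ [(((x :: rest).length : Nat) : Int)]) by simp]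
    rw [List.tail_cons]
    have hpw := pairwise_bnd (x :: rest) g (by simp)
    have hall : ∀ p ∈ ((0 : Int) :: (gapB (x :: rest) g 1 ++ [(((x :: rest).length : Nat) : Int)])).zip
        (gapB (x :: rest) g 1 ++ [(((x :: rest).length : Nat) : Int)]),
        (((fun p => PySem.List.slice (x :: rest) (some p.1) (some p.2)) p).length : Int) = p.2 - p.1 := by
      intro p hp
      obtain ⟨a, b⟩ := p
      have hmem := List.of_mem_zip hp
      have h1 : a ∈ (0 : Int) :: (gapB (x :: rest) g 1 ++ [(((x :: rest).length : Nat) : Int)]) := hmem.1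
      have h2 : b ∈ (0 : Int) :: (gapB (x :: rest) g 1 ++ [(((x :: rest).length : Nat) : Int)]) :=
        List.mem_of_mem_tail (by simpa using hmem.2)
      have hba := bnd_bounds h1
      have hbb := bnd_bounds h2
      have hlt : a < b := by
        have := zip_tail_adj _ hpw (a, b) (by simpa using hp)
        simpa using this
      exact slice_len (x :: rest) a b hba.1 (le_of_lt hlt) hbb.2
    have hst : (((fun p => PySem.List.slice (x :: rest) (some p.1) (some p.2)) ((0 : Int), (0 : Int))).length : Int) = ((0 : Int), (0 : Int)).2 - ((0 : Int), (0 : Int)).1 := by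
      simp only []
      rw [PySem.List.slice_toNat _ (by omega) (by omega)]
      simp
    have hcomm := foldl_pick_commute (fun p => PySem.List.slice (x :: rest) (some p.1) (some p.2))
      (((0 : Int) :: (gapB (x :: rest) g 1 ++ [(((x :: rest).length : Nat) : Int)])).zip
        (gapB (x :: rest) g 1 ++ [(((x :: rest).length : Nat) : Int)])) ((0 : Int), (0 : Int)) hall hst
    simp only [] at hcomm
    rw [hcomm]
    have hsl := slicesB g rest [] x
    simp only [List.nil_append, List.length_nil, Nat.cast_zero, zero_add] at hsl
    rw [hsl]
    have h00 : PySem.List.slice (x :: rest) (some (0 : Int)) (some (0 : Int)) = [] := by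
      rw [PySem.List.slice_toNat _ (by omega) (by omega)]
      simp
    rw [h00]
  rw [hA, hB]
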